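-- pv_equiv track=rewrite | github.com/petermd/aoc2020 | day14.py | generate_seq
-- ===== SOURCE A (Python) =====
-- def generate_seq(num):
--     perm = [ 0x0 ]
--     check = 1
--     while(check <= num):
--         if check & num:
--             perm = [v | check for v in perm] + perm
--         check <<=1
--     return perm
-- ===== SOURCE B (Python) =====
-- def generate_seq(num):
--     # classic submask enumeration: sub = (sub-1) & num walks num's submasks in decreasing order
--     if num <= 0:
--         return [0]
--     res = []
--     sub = num
--     while True:
--         res.append(sub)
--         if sub == 0:
--             break
--         sub = (sub - 1) & num
--     return res
-- ===== Notes on version B (the rewrite author's own statement) =====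
-- stated objective: idiomatic
-- what changed: Replaces the bit-position sweeping loop that repeatedly rebuilds a doubling list with the classic submask-enumeration idiom sub = (sub - 1) & num, which emits the same submasks in the same decreasing order directly.
import Mathlib
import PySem

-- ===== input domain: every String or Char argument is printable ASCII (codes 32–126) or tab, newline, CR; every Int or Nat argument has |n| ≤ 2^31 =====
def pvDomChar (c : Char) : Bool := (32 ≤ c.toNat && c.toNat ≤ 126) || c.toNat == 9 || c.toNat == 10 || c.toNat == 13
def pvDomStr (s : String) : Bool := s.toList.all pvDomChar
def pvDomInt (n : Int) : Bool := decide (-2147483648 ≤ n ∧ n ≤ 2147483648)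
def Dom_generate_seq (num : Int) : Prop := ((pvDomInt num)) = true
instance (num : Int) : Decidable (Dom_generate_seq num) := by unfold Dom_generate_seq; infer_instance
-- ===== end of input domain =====

-- B replaces A's bit-position sweep that rebuilds a doubling list with the classic
-- submask-enumeration idiom sub = (sub - 1) & num (same values, same decreasing order); objective: idiomatic.
-- All run-time values in both Pythons are nonnegative ints, so the loops are transcribed over Nat
-- (with check = 2^j in A) and the Int result is mapped at the end.

-- ===== PORT A =====
-- A's while loop: check = 2^j sweeps upward while check ≤ num; on a set bit the list doubles.
def genLoopA (n : Nat) (j : Nat) (perm : List Nat) : List Nat :=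
  if 2 ^ j ≤ n then
    genLoopA n (j + 1) (if 2 ^ j &&& n ≠ 0 then perm.map (· ||| 2 ^ j) ++ perm else perm)
  else perm
termination_by n + 1 - 2 ^ j
decreasing_by
  have h1 : 1 ≤ 2 ^ j := Nat.one_le_two_pow
  omega

def generate_seq (num : Int) : List Int :=
  (genLoopA num.toNat 0 [0]).map (fun v => (v : Int))

-- ===== PORT B =====
-- B's loop: append sub, stop after 0, else sub = (sub - 1) & num.
def chainB (n : Nat) (sub : Nat) : List Nat :=
  sub :: (if h : sub = 0 then [] else chainB n ((sub - 1) &&& n))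
termination_by sub
decreasing_by
  have := Nat.and_le_left (n := sub - 1) (m := n)
  omega

def generate_seq_alt (num : Int) : List Int :=
  if num ≤ 0 then [0]
  else (chainB num.toNat num.toNat).map (fun v => (v : Int))

-- ===== PRECONDITION & SPEC =====
def Spec_generate_seq (num : Int) (out : List Int) : Prop := out = generate_seq_alt num
instance (num : Int) (out : List Int) : Decidable (Spec_generate_seq num out) := by unfold Spec_generate_seq; infer_instance

-- ===== CLAIM (what is proved, stated in full; the proofs are below) =====
def Claim_equal_generate_seq : Prop := ∀ (num : Int), Dom_generate_seq num → Spec_generate_seq num (generate_seq num)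

-- ===== LEMMAS AND PROOFS =====

-- The common specification: the submasks of n, in decreasing order (highest bit split first).
def subs (n : Nat) : List Nat :=
  if h : n = 0 then [0]
  else
    (subs (n - 2 ^ Nat.log2 n)).map (· + 2 ^ Nat.log2 n) ++ subs (n - 2 ^ Nat.log2 n)
termination_by n
decreasing_by
  have h1 : 2 ^ Nat.log2 n ≤ n := Nat.log2_self_le h
  have h2 : 1 ≤ 2 ^ Nat.log2 n := Nat.one_le_two_pow
  omega

-- ---- bit arithmetic helpers ----

theorem two_pow_or_eq_add {k b : Nat} (h : b < 2 ^ k) : 2 ^ k ||| b = 2 ^ k + b := by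
  have := Nat.two_pow_add_eq_or_of_lt h 1
  simpa using this.symm

theorem and_high {k a b : Nat} (ha : a < 2 ^ k) (hb : b < 2 ^ k) :
    a &&& (2 ^ k + b) = a &&& b := by
  rw [← two_pow_or_eq_add hb]
  apply Nat.eq_of_testBit_eq; intro i
  simp only [Nat.testBit_and, Nat.testBit_or, Nat.testBit_two_pow]
  by_cases hik : k = i
  · subst hik
    have : a.testBit k = false := Nat.testBit_lt_two_pow ha
    simp [this]
  · simp [hik]

theorem and_both_high {k a b : Nat} (ha : a < 2 ^ k) (hb : b < 2 ^ k) :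
    (2 ^ k + a) &&& (2 ^ k + b) = 2 ^ k + (a &&& b) := by
  have hab : a &&& b < 2 ^ k := lt_of_le_of_lt Nat.and_le_left ha
  rw [← two_pow_or_eq_add ha, ← two_pow_or_eq_add hb, ← two_pow_or_eq_add hab]
  apply Nat.eq_of_testBit_eq; intro i
  simp only [Nat.testBit_and, Nat.testBit_or]
  cases (2 ^ k).testBit i <;> simp

theorem and_mask {k b : Nat} (hb : b < 2 ^ k) : (2 ^ k - 1) &&& (2 ^ k + b) = b := by
  rw [← two_pow_or_eq_add hb]
  apply Nat.eq_of_testBit_eq; intro i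
  simp only [Nat.testBit_and, Nat.testBit_or, Nat.testBit_two_pow, Nat.testBit_two_pow_sub_one]
  by_cases hik : i < k
  · simp [hik, Nat.ne_of_gt hik]
  · have hbf : b.testBit i = false :=
      Nat.testBit_lt_two_pow (lt_of_lt_of_le hb (Nat.pow_le_pow_right (by norm_num) (le_of_not_gt hik)))
    by_cases hk : k = i <;> simp [hik, hk, hbf]

-- ---- subs facts ----

theorem subs_zero : subs 0 = [0] := by rw [subs]; simp

theorem subs_two_pow_add {k r : Nat} (hr : r < 2 ^ k) :
    subs (2 ^ k + r) = (subs r).map (· + 2 ^ k) ++ subs r := by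
  have hne : 2 ^ k + r ≠ 0 := by positivity
  have hlog : Nat.log2 (2 ^ k + r) = k := by
    rw [Nat.log2_eq_log_two]
    exact Nat.log_eq_of_pow_le_of_lt_pow (Nat.le_add_right _ _) (by rw [pow_succ]; omega)
  rw [subs]
  simp [hlog]

theorem subs_le : ∀ n, ∀ x ∈ subs n, x ≤ n := by
  intro n
  induction n using Nat.strong_induction_on with
  | _ n ih =>
    by_cases h : n = 0
    · subst h; simp [subs_zero]
    · have h1 : 2 ^ Nat.log2 n ≤ n := Nat.log2_self_le h
      have h2 : 1 ≤ 2 ^ Nat.log2 n := Nat.one_le_two_pow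
      intro x hx
      rw [subs] at hx
      simp only [h, dif_neg, not_false_iff, List.mem_append, List.mem_map] at hx
      rcases hx with ⟨y, hy, rfl⟩ | hx
      · have := ih (n - 2 ^ Nat.log2 n) (by omega) y hy
        omega
      · have := ih (n - 2 ^ Nat.log2 n) (by omega) x hx
        omega

-- ---- A's loop computes subs ----

theorem genLoopA_eq : ∀ hi, ∀ j lo, lo < 2 ^ j →
    genLoopA (hi * 2 ^ j + lo) j (subs lo) = subs (hi * 2 ^ j + lo) := by
  intro hi
  induction hi using Nat.strong_induction_on with
  | _ hi ih =>
    intro j lo hlo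
    by_cases h0 : hi = 0
    · subst h0
      rw [genLoopA]
      simp [Nat.not_le.mpr hlo]
    · have hpos : 1 ≤ hi := Nat.one_le_iff_ne_zero.mpr h0
      have hle : 2 ^ j ≤ hi * 2 ^ j + lo :=
        le_trans (Nat.le_mul_of_pos_left _ hpos) (Nat.le_add_right _ _)
      have hdiv : (hi * 2 ^ j + lo) / 2 ^ j = hi := by
        rw [Nat.mul_comm, Nat.mul_add_div (by positivity), Nat.div_eq_of_lt hlo, Nat.add_zero]
      have htb : (hi * 2 ^ j + lo).testBit j = decide (hi % 2 = 1) := by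
        rw [Nat.testBit_eq_decide_div_mod_eq, hdiv]
      have hand : 2 ^ j &&& (hi * 2 ^ j + lo) = 2 ^ j * (hi % 2) := by
        rw [Nat.two_pow_and, htb]
        rcases Nat.mod_two_eq_zero_or_one hi with h | h <;> simp [h]
      have hhalf : hi / 2 < hi := Nat.div_lt_self (by omega) (by omega)
      rw [genLoopA, if_pos hle]
      rcases Nat.mod_two_eq_zero_or_one hi with hp | hp
      · have hcond : ¬ (2 ^ j &&& (hi * 2 ^ j + lo) ≠ 0) := by simp [hand, hp]
        rw [if_neg hcond]
        have hlo' : lo < 2 ^ (j + 1) := lt_of_lt_of_le hlo (by rw [pow_succ]; omega)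
        have hn' : hi * 2 ^ j + lo = hi / 2 * 2 ^ (j + 1) + lo := by
          have e1 : hi = 2 * (hi / 2) := by omega
          rw [pow_succ]
          nth_rewrite 1 [e1]
          ring
        rw [hn']
        exact ih _ hhalf (j + 1) lo hlo'
      · have hcond : 2 ^ j &&& (hi * 2 ^ j + lo) ≠ 0 := by
          rw [hand, hp]; positivity
        rw [if_pos hcond]
        have hmap : (subs lo).map (· ||| 2 ^ j) = (subs lo).map (· + 2 ^ j) := by
          apply List.map_congr_left
          intro x hx
          have hxlt : x < 2 ^ j := lt_of_le_of_lt (subs_le lo x hx) hlo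
          rw [Nat.lor_comm, two_pow_or_eq_add hxlt, Nat.add_comm]
        have hperm : (subs lo).map (· ||| 2 ^ j) ++ subs lo = subs (2 ^ j + lo) := by
          rw [hmap, ← subs_two_pow_add hlo]
        have hlo' : 2 ^ j + lo < 2 ^ (j + 1) := by rw [pow_succ]; omega
        have hn' : hi * 2 ^ j + lo = hi / 2 * 2 ^ (j + 1) + (2 ^ j + lo) := by
          have e1 : hi = 2 * (hi / 2) + 1 := by omega
          rw [pow_succ]
          nth_rewrite 1 [e1]
          ring
        rw [hperm, hn']
        exact ih _ hhalf (j + 1) _ hlo'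

-- ---- B's chain computes subs ----

theorem chainB_zero (n : Nat) : chainB n 0 = [0] := by rw [chainB]; simp

theorem chainB_low {k r : Nat} (hr : r < 2 ^ k) :
    ∀ s, s ≤ r → chainB (2 ^ k + r) s = chainB r s := by
  intro s
  induction s using Nat.strong_induction_on with
  | _ s ih =>
    intro hs
    by_cases h0 : s = 0
    · subst h0; rw [chainB_zero, chainB_zero]
    · have hstep : (s - 1) &&& (2 ^ k + r) = (s - 1) &&& r :=
        and_high (by omega) hr
      have hlt : (s - 1) &&& r < s := lt_of_le_of_lt Nat.and_le_left (by omega)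
      have hle : (s - 1) &&& r ≤ r := Nat.and_le_right
      conv_lhs => rw [chainB]
      conv_rhs => rw [chainB]
      rw [dif_neg h0, dif_neg h0, hstep, ih _ hlt hle]

theorem chainB_split {k r : Nat} (hr : r < 2 ^ k) :
    ∀ s, s ≤ r → chainB (2 ^ k + r) (2 ^ k + s) =
      (chainB r s).map (· + 2 ^ k) ++ chainB (2 ^ k + r) r := by
  intro s
  induction s using Nat.strong_induction_on with
  | _ s ih =>
    intro hs
    by_cases h0 : s = 0
    · subst h0
      have hne : 2 ^ k + 0 ≠ 0 := by positivity
      conv_lhs => rw [chainB]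
      have hm : 2 ^ k + 0 - 1 &&& 2 ^ k + r = r := by simpa using and_mask hr
      rw [dif_neg hne, hm, chainB_zero]
      simp
    · have hne : 2 ^ k + s ≠ 0 := by positivity
      have hstep : 2 ^ k + s - 1 &&& 2 ^ k + r = 2 ^ k + ((s - 1) &&& r) := by
        have : 2 ^ k + s - 1 = 2 ^ k + (s - 1) := by omega
        rw [this]; exact and_both_high (by omega) hr
      have hlt : (s - 1) &&& r < s := lt_of_le_of_lt Nat.and_le_left (by omega)
      have hle : (s - 1) &&& r ≤ r := Nat.and_le_right
      conv_lhs => rw [chainB]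
      rw [dif_neg hne, hstep, ih _ hlt hle]
      conv_rhs => rw [chainB]
      rw [dif_neg h0]
      simp [Nat.add_comm]

theorem chainB_eq : ∀ n, chainB n n = subs n := by
  intro n
  induction n using Nat.strong_induction_on with
  | _ n ih =>
    by_cases h : n = 0
    · subst h; rw [chainB_zero, subs_zero]
    · have h1 : 2 ^ Nat.log2 n ≤ n := Nat.log2_self_le h
      have h2 : n < 2 ^ (Nat.log2 n + 1) := Nat.lt_log2_self
      set k := Nat.log2 n
      set r := n - 2 ^ k with hrdef
      have hr : r < 2 ^ k := by rw [pow_succ] at h2; omega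
      have hn : n = 2 ^ k + r := by omega
      rw [hn, chainB_split hr r le_rfl, chainB_low hr r le_rfl,
          ih r (by omega), subs_two_pow_add hr]

-- ---- put together ----

theorem main_nat (n : Nat) : genLoopA n 0 [0] = chainB n n := by
  have h := genLoopA_eq n 0 0 (by norm_num)
  simp only [pow_zero, mul_one, Nat.add_zero] at h
  rw [show ([0] : List Nat) = subs 0 from subs_zero.symm, h, ← chainB_eq]

-- ===== VERDICT (by name: the statement is the Claim_ definition above) =====
theorem generate_seq_spec : Claim_equal_generate_seq := by
  intro num _
  unfold Spec_generate_seq generate_seq generate_seq_alt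
  by_cases h : num ≤ 0
  · have : num.toNat = 0 := Int.toNat_of_nonpos h
    rw [this, genLoopA]
    simp [h]
  · simp only [h, if_false]
    rw [main_nat]
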